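-- pv_equiv track=rewrite | github.com/shvidkyu/fb-labs-2022 | cp_2/huzenkov_fb-03_sirkhovets_fb-03/vigenere.py | count_frequencies
-- ===== SOURCE A (Python) =====
-- def count_frequencies(text):
--     freq = dict()
--     for i in text:
--         if i not in freq.keys():
--             freq[i] = 1
--         else:
--             freq[i] += 1
--     return freq
-- ===== SOURCE B (Python) =====
-- def count_frequencies(text):
--     return {c: sum(1 for x in text if x == c) for c in dict.fromkeys(text)}
-- ===== Notes on version B (the rewrite author's own statement) =====
-- stated objective: alternative
-- what changed: Replaces the single-pass incrementing dict accumulator with a keys-first strategy: dict.fromkeys(text) fixes the distinct characters in first-appearance order, then each character's count is computed by an independent scan of the text.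
import Mathlib
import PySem

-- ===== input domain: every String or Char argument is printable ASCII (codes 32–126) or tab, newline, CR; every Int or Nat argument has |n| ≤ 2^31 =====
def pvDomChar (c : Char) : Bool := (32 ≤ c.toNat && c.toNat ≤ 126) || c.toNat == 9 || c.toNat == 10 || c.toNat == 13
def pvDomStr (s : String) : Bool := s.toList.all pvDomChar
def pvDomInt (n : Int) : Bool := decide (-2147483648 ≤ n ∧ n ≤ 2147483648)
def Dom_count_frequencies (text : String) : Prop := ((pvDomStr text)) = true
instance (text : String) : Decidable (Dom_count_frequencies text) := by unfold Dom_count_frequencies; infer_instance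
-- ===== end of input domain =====

-- B replaces A's single-pass incrementing dict accumulator by dict.fromkeys-first keys, then one independent counting scan per key (alternative decomposition, not claimed faster).

-- ===== PORT A =====
-- one pass; freq[i] created at 1 or incremented (keys are the 1-char strings Python iteration yields)
def count_frequencies (text : String) : List (String × Int) :=
  (text.toList.foldl (fun freq c =>
      let i := String.ofList [c]
      if freq.contains i = false then freq.insert i 1
      else freq.insert i (freq.getD i 0 + 1))
    (PySem.Dict.empty : PySem.Dict String Int)).items

-- ===== PORT B =====
-- dict.fromkeys(text) = first-appearance-ordered distinct chars; value = sum(1 for x in text if x == c)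
def count_frequencies_alt (text : String) : List (String × Int) :=
  (PySem.List.dedup text.toList).map (fun c =>
    (String.ofList [c], text.toList.foldl (fun acc x => if x == c then acc + 1 else acc) (0 : Int)))

-- ===== PRECONDITION & SPEC =====
def Spec_count_frequencies (text : String) (out : List (String × Int)) : Prop := out = count_frequencies_alt text
instance (text : String) (out : List (String × Int)) : Decidable (Spec_count_frequencies text out) := by unfold Spec_count_frequencies; infer_instance

-- ===== CLAIM (what is proved, stated in full; the proofs are below) =====
def Claim_equal_count_frequencies : Prop := ∀ (text : String), Dom_count_frequencies text → Spec_count_frequencies text (count_frequencies text)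

-- ===== LEMMAS AND PROOFS =====

-- the string-key wrapper is injective
theorem pv_mk_inj : Function.Injective (fun c : Char => String.ofList [c]) := by
  intro a b h
  simpa using congrArg String.toList h

-- Set.ofList commutes with an injective map (accumulator-generalised)
theorem pv_add_map {α β : Type} [DecidableEq α] [DecidableEq β] (k : α → β)
    (hk : Function.Injective k) (acc : List α) (x : α) :
    PySem.Set.add (acc.map k) (k x) = (PySem.Set.add acc x).map k := by
  simp [PySem.Set.add, List.mem_map, hk.eq_iff]
  split_ifs with h
  · rfl
  · simp

theorem pv_foldl_add_map {α β : Type} [DecidableEq α] [DecidableEq β] (k : α → β)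
    (hk : Function.Injective k) (xs : List α) (acc : List α) :
    (xs.map k).foldl PySem.Set.add (acc.map k) = (xs.foldl PySem.Set.add acc).map k := by
  induction xs generalizing acc with
  | nil => rfl
  | cons x t ih => simpa [pv_add_map k hk acc x] using ih (PySem.Set.add acc x)

theorem pv_ofList_map {α β : Type} [DecidableEq α] [DecidableEq β] (k : α → β)
    (hk : Function.Injective k) (xs : List α) :
    PySem.Set.ofList (xs.map k) = (PySem.Set.ofList xs).map k := by
  simpa [PySem.Set.ofList] using pv_foldl_add_map k hk xs []

-- ===== VERDICT (by name: the statement is the Claim_ definition above) =====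
theorem count_frequencies_spec : Claim_equal_count_frequencies := by
  intro text _
  unfold Spec_count_frequencies count_frequencies count_frequencies_alt
  have hstep : ∀ (d : PySem.Dict String Int) (c : Char),
      (let i := String.ofList [c];
       if d.contains i = false then d.insert i 1
       else d.insert i (d.getD i 0 + 1))
      = d.insert (String.ofList [c]) (d.getD (String.ofList [c]) 0 + 1) := by
    intro d c
    by_cases h : d.contains (String.ofList [c]) = true
    · simp [h]
    · have hf : d.contains (String.ofList [c]) = false := by simpa using h
      simp [hf, PySem.Dict.getD_of_not_contains d 0 hf]
  have hfun : (fun (freq : PySem.Dict String Int) (c : Char) =>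
      let i := String.ofList [c]
      if freq.contains i = false then freq.insert i 1
      else freq.insert i (freq.getD i 0 + 1))
      = fun d c => d.insert (String.ofList [c]) (d.getD (String.ofList [c]) 0 + 1) :=
    funext fun d => funext fun c => hstep d c
  calc (text.toList.foldl (fun freq c =>
          let i := String.ofList [c]
          if freq.contains i = false then freq.insert i 1
          else freq.insert i (freq.getD i 0 + 1))
        (PySem.Dict.empty : PySem.Dict String Int)).items
      = ((text.toList.map (fun c => String.ofList [c])).foldl
          (fun d x => d.insert x (d.getD x 0 + 1)) PySem.Dict.empty).items := by
        rw [hfun, List.foldl_map]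
    _ = (PySem.Dict.counter (text.toList.map (fun c => String.ofList [c]))).items := by
        rw [PySem.Dict.foldl_insert_getD_add_one_eq_counter]
    _ = (PySem.Set.ofList (text.toList.map (fun c => String.ofList [c]))).map
          (fun s => (s, ((text.toList.map (fun c => String.ofList [c])).count s : Int))) := by
        rw [PySem.Dict.items_counter]
    _ = (PySem.List.dedup text.toList).map (fun c =>
          (String.ofList [c], text.toList.foldl (fun acc x => if x == c then acc + 1 else acc) (0 : Int))) := by
        rw [pv_ofList_map _ pv_mk_inj, List.map_map]
        simp only [PySem.List.dedup_eq_ofList]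
        refine List.map_congr_left (fun c _ => ?_)
        rw [PySem.List.foldl_beq_add_one]
        simp [List.count_map_of_injective _ _ pv_mk_inj]
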